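-- pv_equiv track=rewrite | github.com/hendrikheller/tu_cfd_blender | tucfdblender.py | only_single_spaces
-- ===== SOURCE A (Python) =====
-- def only_single_spaces(s):
--     assert isinstance(s, str)
--     space = False
--     for c in s:
--         if c == " ":
--             if space is False:
--                 space = True
--             else:
--                 return False
--         else:
--             space = False
--     return True
-- ===== SOURCE B (Python) =====
-- def only_single_spaces(s):
--     assert isinstance(s, str)
--     return "  " not in s
-- ===== Notes on version B (the rewrite author's own statement) =====
-- stated objective: idiomatic
-- what changed: Replaced the explicit character loop maintaining a previous-char-was-a-space flag by a single substring containment test for a double space (no loop, no state).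
import Mathlib
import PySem

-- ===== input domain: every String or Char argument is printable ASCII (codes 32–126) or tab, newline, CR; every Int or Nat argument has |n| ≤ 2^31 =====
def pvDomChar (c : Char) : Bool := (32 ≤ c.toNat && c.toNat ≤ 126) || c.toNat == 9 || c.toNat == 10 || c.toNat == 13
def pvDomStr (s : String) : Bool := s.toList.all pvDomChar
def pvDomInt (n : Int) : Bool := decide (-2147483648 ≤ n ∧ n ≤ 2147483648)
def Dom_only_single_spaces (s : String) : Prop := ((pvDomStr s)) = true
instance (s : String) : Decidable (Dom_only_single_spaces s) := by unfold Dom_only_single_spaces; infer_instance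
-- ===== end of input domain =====

-- B replaces A's character loop with a stateful flag by one substring containment test ("  " not in s); idiomatic, same cost.

-- ===== PORT A =====
-- the for-loop over s with the 'space' flag and the early 'return False'
def ossLoop : List Char → Bool → Bool
  | [], _ => true
  | c :: rest, space =>
    if c = ' ' then
      if space = false then ossLoop rest true else false
    else ossLoop rest false

def only_single_spaces (s : String) : Bool := ossLoop s.toList false

-- ===== PORT B =====
def only_single_spaces_alt (s : String) : Bool := !(PySem.Str.isIn "  " s)

-- ===== PRECONDITION & SPEC =====
def Spec_only_single_spaces (s : String) (out : Bool) : Prop := out = only_single_spaces_alt s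
instance (s : String) (out : Bool) : Decidable (Spec_only_single_spaces s out) := by unfold Spec_only_single_spaces; infer_instance

-- ===== CLAIM (what is proved, stated in full; the proofs are below) =====
def Claim_equal_only_single_spaces : Prop := ∀ (s : String), Dom_only_single_spaces s → Spec_only_single_spaces s (only_single_spaces s)

-- ===== LEMMAS AND PROOFS =====

theorem pvSpaceCases (d : Char) : (¬(' ' = d) ∧ ¬(d = ' ')) ∨ d = ' ' := by
  by_cases h : d = ' '
  · exact Or.inr h
  · exact Or.inl ⟨fun he => h he.symm, h⟩

-- the loop's invariant: with flag false it reports 'no "  " infix'; with flag true additionally the next char must not be a space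
theorem ossLoop_char : ∀ (l : List Char),
    (ossLoop l false = !decide ([' ', ' '] <:+: l)) ∧
    (ossLoop l true = (!decide ([' ', ' '] <:+: l) && !(l.head? == some ' ')))
  | [] => by simp [ossLoop]
  | c :: rest => by
    obtain ⟨ihf, iht⟩ := ossLoop_char rest
    by_cases hc : c = ' '
    · subst hc
      constructor
      · simp only [ossLoop, iht, List.infix_cons_iff, List.cons_prefix_cons]
        cases rest with
        | nil => simp
        | cons d t =>
          rcases pvSpaceCases d with ⟨hd1, hd2⟩ | hd
          · simp [hd1, hd2, List.cons_prefix_cons, List.infix_cons_iff]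
          · simp [hd, List.cons_prefix_cons, List.infix_cons_iff]
      · simp only [ossLoop, List.infix_cons_iff, List.cons_prefix_cons]
        cases rest with
        | nil => simp
        | cons d t =>
          rcases pvSpaceCases d with ⟨hd1, hd2⟩ | hd
          · simp [hd1, List.cons_prefix_cons]
          · simp [hd, List.cons_prefix_cons]
    · have hinf : ([' ', ' '] <:+: c :: rest) ↔ ([' ', ' '] <:+: rest) := by
        rw [List.infix_cons_iff]
        constructor
        · rintro (hp | h)
          · exact absurd (List.cons_prefix_cons.mp hp).1.symm hc
          · exact h
        · exact Or.inr
      constructor <;> simp [ossLoop, hc, ihf, hinf]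

-- ===== VERDICT (by name: the statement is the Claim_ definition above) =====
theorem only_single_spaces_spec : Claim_equal_only_single_spaces := by
  intro s _
  unfold Spec_only_single_spaces only_single_spaces only_single_spaces_alt
  rw [(ossLoop_char s.toList).1, PySem.Str.isIn_eq]
  by_cases h : ([' ', ' '] <:+: s.toList)
  · have ht : PySem.Chars.isIn [' ', ' '] s.toList = true :=
      (PySem.Chars.isIn_iff_infix _ _).2 h
    simp [h, ht]
  · have hf : PySem.Chars.isIn [' ', ' '] s.toList = false :=
      (PySem.Chars.isIn_eq_false_iff _ _).2 h
    simp [h, hf]
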